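-- pv_equiv track=rewrite | github.com/terrene-foundation/kailash-py | packages/kailash-kaizen/src/kaizen/l3/context/projection.py | _generate_representative_keys
-- ===== SOURCE A (Python) =====
-- def _generate_representative_keys(pattern: str) -> list[str]:
--     """Generate representative keys that a pattern would match.
--
--     This is used for is_subset_of() — we need to test whether another
--     projection also permits these keys. We generate keys at various
--     depths to cover single-star and double-star patterns.
--     """
--     parts = pattern.split(".")
--     keys: list[str] = []
--
--     # Check if pattern contains any glob chars
--     has_glob = any(p in ("*", "**") for p in parts)
--
--     if not has_glob:
--         # Literal pattern — only matches itself
--         keys.append(pattern)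
--         return keys
--
--     # Generate keys by expanding globs
--     _expand_pattern(parts, 0, [], keys, depth_limit=4)
--     return keys
--
-- def _expand_pattern(
--     parts: list[str],
--     idx: int,
--     current: list[str],
--     results: list[str],
--     depth_limit: int,
-- ) -> None:
--     """Recursively expand a pattern into representative keys."""
--     if idx == len(parts):
--         if current:
--             results.append(".".join(current))
--         return
--
--     part = parts[idx]
--
--     if part == "*":
--         # Generate a few representative single-segment values
--         for seg in ("_x_", "_y_", "_z_"):
--             _expand_pattern(parts, idx + 1, current + [seg], results, depth_limit)
--     elif part == "**":
--         # ** matches zero or more segments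
--         # Zero segments — skip **
--         _expand_pattern(parts, idx + 1, current, results, depth_limit)
--         # One segment
--         for seg in ("_x_", "_y_"):
--             _expand_pattern(parts, idx + 1, current + [seg], results, depth_limit)
--         # Two segments (for coverage of deeper nesting)
--         if depth_limit > 0:
--             _expand_pattern(
--                 parts, idx + 1, current + ["_x_", "_y_"], results, depth_limit - 1
--             )
--     else:
--         # Literal segment
--         _expand_pattern(parts, idx + 1, current + [part], results, depth_limit)
-- ===== SOURCE B (Python) =====
-- def _generate_representative_keys(pattern: str) -> list[str]:
--     parts = pattern.split(".")
--     if not any(p in ("*", "**") for p in parts):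
--         return [pattern]
--     # Iterative frontier fold: each state is (segments so far, remaining depth budget)
--     frontier = [([], 4)]
--     for part in parts:
--         new_frontier = []
--         for cur, d in frontier:
--             if part == "*":
--                 for seg in ("_x_", "_y_", "_z_"):
--                     new_frontier.append((cur + [seg], d))
--             elif part == "**":
--                 new_frontier.append((cur, d))
--                 new_frontier.append((cur + ["_x_"], d))
--                 new_frontier.append((cur + ["_y_"], d))
--                 if d > 0:
--                     new_frontier.append((cur + ["_x_", "_y_"], d - 1))
--             else:
--                 new_frontier.append((cur + [part], d))
--         frontier = new_frontier
--     return [".".join(cur) for cur, _ in frontier if cur]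
-- ===== Notes on version B (the rewrite author's own statement) =====
-- stated objective: alternative
-- what changed: Replaced the recursive DFS _expand_pattern (mutating a results list) with an iterative fold over the pattern parts that maintains a frontier of (segments, depth-budget) states and joins non-empty states at the end.
import Mathlib
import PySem

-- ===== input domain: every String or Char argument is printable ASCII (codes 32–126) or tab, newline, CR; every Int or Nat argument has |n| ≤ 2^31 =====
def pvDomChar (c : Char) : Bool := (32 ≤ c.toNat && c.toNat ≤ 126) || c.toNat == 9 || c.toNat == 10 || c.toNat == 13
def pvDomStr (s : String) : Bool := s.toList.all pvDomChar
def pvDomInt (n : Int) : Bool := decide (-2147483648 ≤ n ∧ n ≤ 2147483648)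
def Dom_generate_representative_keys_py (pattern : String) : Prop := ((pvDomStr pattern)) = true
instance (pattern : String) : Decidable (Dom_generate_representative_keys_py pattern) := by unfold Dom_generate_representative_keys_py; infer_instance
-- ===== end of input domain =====

-- B replaces A's recursive DFS expansion with an iterative fold over the parts that
-- maintains a frontier of (segments, depth-budget) states (objective: alternative).

-- ===== PORT A =====
-- _expand_pattern: recursion on the suffix of parts (Python's idx); `results` is
-- threaded and returned instead of mutated in place.
def pvExpandA (parts : List String) (current : List String) (results : List String)
    (depth_limit : Int) : List String :=
  match parts with
  | [] => if current ≠ [] then results ++ [PySem.Str.join "." current] else results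
  | part :: rest =>
    if part = "*" then
      let r1 := pvExpandA rest (current ++ ["_x_"]) results depth_limit
      let r2 := pvExpandA rest (current ++ ["_y_"]) r1 depth_limit
      pvExpandA rest (current ++ ["_z_"]) r2 depth_limit
    else if part = "**" then
      let r1 := pvExpandA rest current results depth_limit
      let r2 := pvExpandA rest (current ++ ["_x_"]) r1 depth_limit
      let r3 := pvExpandA rest (current ++ ["_y_"]) r2 depth_limit
      if depth_limit > 0 then
        pvExpandA rest (current ++ ["_x_", "_y_"]) r3 (depth_limit - 1)
      else r3
    else
      pvExpandA rest (current ++ [part]) results depth_limit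

def generate_representative_keys_py (pattern : String) : List String :=
  let parts := (PySem.Str.split? pattern ".").getD []
  let has_glob := parts.any (fun p => p = "*" || p = "**")
  if !has_glob then [pattern]
  else pvExpandA parts [] [] 4

-- ===== PORT B =====
-- one frontier state's expansions for one part
def pvStepB (part : String) (st : List String × Int) : List (List String × Int) :=
  if part = "*" then
    [(st.1 ++ ["_x_"], st.2), (st.1 ++ ["_y_"], st.2), (st.1 ++ ["_z_"], st.2)]
  else if part = "**" then
    [(st.1, st.2), (st.1 ++ ["_x_"], st.2), (st.1 ++ ["_y_"], st.2)] ++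
      (if st.2 > 0 then [(st.1 ++ ["_x_", "_y_"], st.2 - 1)] else [])
  else
    [(st.1 ++ [part], st.2)]

def generate_representative_keys_py_alt (pattern : String) : List String :=
  let parts := (PySem.Str.split? pattern ".").getD []
  if !(parts.any (fun p => p = "*" || p = "**")) then [pattern]
  else
    let frontier := parts.foldl (fun fr part => fr.flatMap (pvStepB part)) [([], (4 : Int))]
    (frontier.filter (fun st => !st.1.isEmpty)).map (fun st => PySem.Str.join "." st.1)

-- ===== PRECONDITION & SPEC =====
def Spec_generate_representative_keys_py (pattern : String) (out : List String) : Prop := out = generate_representative_keys_py_alt pattern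
instance (pattern : String) (out : List String) : Decidable (Spec_generate_representative_keys_py pattern out) := by unfold Spec_generate_representative_keys_py; infer_instance

-- ===== CLAIM (what is proved, stated in full; the proofs are below) =====
def Claim_equal_generate_representative_keys_py : Prop := ∀ (pattern : String), Dom_generate_representative_keys_py pattern → Spec_generate_representative_keys_py pattern (generate_representative_keys_py pattern)

-- ===== LEMMAS AND PROOFS =====

def pvStepAll (parts : List String) (fr : List (List String × Int)) : List (List String × Int) :=
  parts.foldl (fun fr part => fr.flatMap (pvStepB part)) fr

def pvFinish (fr : List (List String × Int)) : List String :=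
  (fr.filter (fun st => !st.1.isEmpty)).map (fun st => PySem.Str.join "." st.1)

theorem pvStepAll_append (parts : List String) (a b : List (List String × Int)) :
    pvStepAll parts (a ++ b) = pvStepAll parts a ++ pvStepAll parts b := by
  induction parts generalizing a b with
  | nil => simp [pvStepAll]
  | cons p rest ih =>
    simp only [pvStepAll, List.foldl_cons, List.flatMap_append] at *
    exact ih _ _

theorem pvFinish_append (a b : List (List String × Int)) :
    pvFinish (a ++ b) = pvFinish a ++ pvFinish b := by
  simp [pvFinish]

theorem pvExpandA_eq (parts : List String) (current results : List String) (d : Int) :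
    pvExpandA parts current results d
      = results ++ pvFinish (pvStepAll parts [(current, d)]) := by
  induction parts generalizing current results d with
  | nil =>
    by_cases h : current = []
    · simp [pvExpandA, pvStepAll, pvFinish, h]
    · simp [pvExpandA, pvStepAll, pvFinish, h]
  | cons p rest ih =>
    have hstep : pvStepAll (p :: rest) [(current, d)] = pvStepAll rest (pvStepB p (current, d)) := by
      simp [pvStepAll]
    by_cases h1 : p = "*"
    · rw [show pvExpandA (p :: rest) current results d
          = pvExpandA rest (current ++ ["_z_"])
              (pvExpandA rest (current ++ ["_y_"])
                (pvExpandA rest (current ++ ["_x_"]) results d) d) d by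
            simp [pvExpandA, h1]]
      rw [ih, ih, ih, hstep]
      rw [show pvStepB p (current, d)
            = [(current ++ ["_x_"], d)] ++ [(current ++ ["_y_"], d)] ++ [(current ++ ["_z_"], d)] by
          simp [pvStepB, h1]]
      rw [pvStepAll_append, pvStepAll_append, pvFinish_append, pvFinish_append]
      simp [List.append_assoc]
    · by_cases h2 : p = "**"
      · by_cases hd : d > 0
        · rw [show pvExpandA (p :: rest) current results d
              = pvExpandA rest (current ++ ["_x_", "_y_"])
                  (pvExpandA rest (current ++ ["_y_"])
                    (pvExpandA rest (current ++ ["_x_"])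
                      (pvExpandA rest current results d) d) d) (d - 1) by
                simp [pvExpandA, h2, hd]]
          rw [ih, ih, ih, ih, hstep]
          rw [show pvStepB p (current, d)
                = [(current, d)] ++ [(current ++ ["_x_"], d)] ++ [(current ++ ["_y_"], d)]
                    ++ [(current ++ ["_x_", "_y_"], d - 1)] by
              simp [pvStepB, h2, hd]]
          rw [pvStepAll_append, pvStepAll_append, pvStepAll_append,
              pvFinish_append, pvFinish_append, pvFinish_append]
          simp [List.append_assoc]
        · rw [show pvExpandA (p :: rest) current results d
              = pvExpandA rest (current ++ ["_y_"])
                  (pvExpandA rest (current ++ ["_x_"])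
                    (pvExpandA rest current results d) d) d by
                simp [pvExpandA, h2, hd]]
          rw [ih, ih, ih, hstep]
          rw [show pvStepB p (current, d)
                = [(current, d)] ++ [(current ++ ["_x_"], d)] ++ [(current ++ ["_y_"], d)] by
              simp [pvStepB, h2, hd]]
          rw [pvStepAll_append, pvStepAll_append, pvFinish_append, pvFinish_append]
          simp [List.append_assoc]
      · rw [show pvExpandA (p :: rest) current results d
            = pvExpandA rest (current ++ [p]) results d by simp [pvExpandA, h1, h2]]
        rw [ih, hstep]
        rw [show pvStepB p (current, d) = [(current ++ [p], d)] by simp [pvStepB, h1, h2]]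

-- ===== VERDICT (by name: the statement is the Claim_ definition above) =====
theorem generate_representative_keys_py_spec : Claim_equal_generate_representative_keys_py := by
  intro pattern _
  unfold Spec_generate_representative_keys_py
  unfold generate_representative_keys_py generate_representative_keys_py_alt
  set parts := (PySem.Str.split? pattern ".").getD [] with hp
  cases h : parts.any (fun p => p = "*" || p = "**") with
  | false => simp [h]
  | true =>
    simp only [h, Bool.not_true, Bool.false_eq_true, if_false]
    rw [pvExpandA_eq]
    simp [pvStepAll, pvFinish]
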